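-- pv_equiv track=rewrite | github.com/nidiavillanuevaa/regex_validator | src/ai/heuristics.py | generar_regex_heuristica
-- ===== SOURCE A (Python) =====
-- def generar_regex_heuristica(ejemplos_positivos):
--     if not ejemplos_positivos:
--         return ""
--
--     # Prefijo común
--     prefijo = ejemplos_positivos[0]
--     for ejemplo in ejemplos_positivos[1:]:
--         while not ejemplo.startswith(prefijo) and prefijo:
--             prefijo = prefijo[:-1]
--
--     # Sufijo común
--     sufijo = ejemplos_positivos[0]
--     for ejemplo in ejemplos_positivos[1:]:
--         while not ejemplo.endswith(sufijo) and sufijo: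
--             sufijo = sufijo[1:]
--
--     # Resultado tentativo
--     if prefijo and sufijo:
--         return f"^{prefijo}.*{sufijo}$"
--     elif prefijo:
--         return f"^{prefijo}.*"
--     elif sufijo:
--         return f".*{sufijo}$"
--     else:
--         return ".*"
-- ===== SOURCE B (Python) =====
-- def generar_regex_heuristica(ejemplos_positivos):
--     if not ejemplos_positivos:
--         return ""
--
--     # Prefijo comun = prefijo comun del minimo y maximo lexicograficos
--     mn = min(ejemplos_positivos)
--     mx = max(ejemplos_positivos)
--     i = 0
--     while i < len(mn) and i < len(mx) and mn[i] == mx[i]: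
--         i += 1
--     prefijo = mn[:i]
--
--     # Sufijo comun = (prefijo comun de las cadenas invertidas) invertido
--     rev = [s[::-1] for s in ejemplos_positivos]
--     rmn = min(rev)
--     rmx = max(rev)
--     j = 0
--     while j < len(rmn) and j < len(rmx) and rmn[j] == rmx[j]:
--         j += 1
--     sufijo = rmn[:j][::-1]
--
--     if prefijo and sufijo:
--         return f"^{prefijo}.*{sufijo}$"
--     elif prefijo:
--         return f"^{prefijo}.*"
--     elif sufijo:
--         return f".*{sufijo}$"
--     else:
--         return ".*"
-- ===== Notes on version B (the rewrite author's own statement) =====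
-- stated objective: alternative
-- what changed: Replaces A's per-example candidate-trimming loops (repeatedly chopping the prefix/suffix candidate until it matches each example) by the lexicographic extremum trick: the common prefix of all strings equals the common prefix of min() and max(), and the common suffix is obtained by applying the same idea to the reversed strings.
import Mathlib
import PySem

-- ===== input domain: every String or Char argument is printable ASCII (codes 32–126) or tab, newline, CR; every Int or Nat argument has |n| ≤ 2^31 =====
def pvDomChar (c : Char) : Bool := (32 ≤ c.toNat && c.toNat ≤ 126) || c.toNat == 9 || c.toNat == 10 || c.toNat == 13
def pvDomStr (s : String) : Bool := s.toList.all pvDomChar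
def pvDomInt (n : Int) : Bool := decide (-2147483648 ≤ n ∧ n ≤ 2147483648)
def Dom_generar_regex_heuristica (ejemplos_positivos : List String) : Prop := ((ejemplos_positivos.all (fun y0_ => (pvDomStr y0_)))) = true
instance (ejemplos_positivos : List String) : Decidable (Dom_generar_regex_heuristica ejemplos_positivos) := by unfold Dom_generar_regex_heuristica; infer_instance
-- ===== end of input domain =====

-- B replaces A's per-example candidate-trimming loops by the lexicographic extremum trick
-- (common prefix of min and max; the same on reversed strings for the suffix): an alternative algorithm, same result.

-- ===== PORT A =====
-- inner while of the prefix pass: 'while not ejemplo.startswith(prefijo) and prefijo: prefijo = prefijo[:-1]'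
-- (prefijo[:-1] is dropLast, exact per PySem.Str.slice_to_neg_one)
def pvTrimP (p e : List Char) : List Char :=
  if PySem.Chars.startswith e p = false ∧ p ≠ [] then pvTrimP p.dropLast e else p
termination_by p.length
decreasing_by
  rename_i h
  have : p.dropLast.length < p.length := by
    cases p with
    | nil => exact absurd rfl h.2
    | cons a t => simp [List.length_dropLast]
  exact this

-- inner while of the suffix pass: 'while not ejemplo.endswith(sufijo) and sufijo: sufijo = sufijo[1:]'
def pvTrimS (s e : List Char) : List Char :=
  if PySem.Chars.endswith e s = false ∧ s ≠ [] then pvTrimS (s.drop 1) e else s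
termination_by s.length
decreasing_by
  rename_i h
  cases s with
  | nil => exact absurd rfl h.2
  | cons a t => simp

def generar_regex_heuristica (ejemplos_positivos : List String) : String :=
  match ejemplos_positivos with
  | [] => ""
  | x :: rest =>
    let prefijo := rest.foldl (fun p e => pvTrimP p e.toList) x.toList
    let sufijo := rest.foldl (fun s e => pvTrimS s e.toList) x.toList
    if prefijo ≠ [] ∧ sufijo ≠ [] then
      String.ofList ('^' :: prefijo ++ '.' :: '*' :: sufijo ++ ['$'])
    else if prefijo ≠ [] then
      String.ofList ('^' :: prefijo ++ ['.', '*'])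
    else if sufijo ≠ [] then
      String.ofList ('.' :: '*' :: sufijo ++ ['$'])
    else
      ".*"

-- ===== PORT B =====
-- the index walk 'while i < len(mn) and i < len(mx) and mn[i] == mx[i]: i += 1' followed by 'mn[:i]',
-- as the obvious structural recursion over the two character lists
def pvWalk (a b : List Char) : List Char :=
  match a, b with
  | x :: as_, y :: bs => if x = y then x :: pvWalk as_ bs else []
  | _, _ => []

def generar_regex_heuristica_alt (ejemplos_positivos : List String) : String :=
  match ejemplos_positivos with
  | [] => ""
  | _ :: _ =>
    let mn := ((PySem.List.min? ejemplos_positivos (fun s => s)).getD "").toList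
    let mx := ((PySem.List.max? ejemplos_positivos (fun s => s)).getD "").toList
    let prefijo := pvWalk mn mx
    let rev := ejemplos_positivos.map (fun s => String.ofList s.toList.reverse)
    let rmn := ((PySem.List.min? rev (fun s => s)).getD "").toList
    let rmx := ((PySem.List.max? rev (fun s => s)).getD "").toList
    let sufijo := (pvWalk rmn rmx).reverse
    if prefijo ≠ [] ∧ sufijo ≠ [] then
      String.ofList ('^' :: prefijo ++ '.' :: '*' :: sufijo ++ ['$'])
    else if prefijo ≠ [] then
      String.ofList ('^' :: prefijo ++ ['.', '*'])
    else if sufijo ≠ [] then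
      String.ofList ('.' :: '*' :: sufijo ++ ['$'])
    else
      ".*"

-- ===== PRECONDITION & SPEC =====
def Spec_generar_regex_heuristica (ejemplos_positivos : List String) (out : String) : Prop := out = generar_regex_heuristica_alt ejemplos_positivos
instance (ejemplos_positivos : List String) (out : String) : Decidable (Spec_generar_regex_heuristica ejemplos_positivos out) := by unfold Spec_generar_regex_heuristica; infer_instance

-- ===== CLAIM (what is proved, stated in full; the proofs are below) =====
def Claim_equal_generar_regex_heuristica : Prop := ∀ (ejemplos_positivos : List String), Dom_generar_regex_heuristica ejemplos_positivos → Spec_generar_regex_heuristica ejemplos_positivos (generar_regex_heuristica ejemplos_positivos)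

-- ===== LEMMAS AND PROOFS =====

-- pvWalk a b is a common prefix of a and b …
theorem pvWalk_prefix_left (a b : List Char) : pvWalk a b <+: a := by
  induction a generalizing b with
  | nil => simp [pvWalk]
  | cons x as_ ih =>
    cases b with
    | nil => simp [pvWalk]
    | cons y bs =>
      by_cases h : x = y
      · simpa [pvWalk, h] using ih bs
      · simp [pvWalk, h]

theorem pvWalk_prefix_right (a b : List Char) : pvWalk a b <+: b := by
  induction a generalizing b with
  | nil => simp [pvWalk]
  | cons x as_ ih =>
    cases b with
    | nil => simp [pvWalk]
    | cons y bs =>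
      by_cases h : x = y
      · subst h; simpa [pvWalk] using ih bs
      · simp [pvWalk, h]

-- … and every common prefix of a and b is a prefix of pvWalk a b
theorem prefix_pvWalk {q a b : List Char} (ha : q <+: a) (hb : q <+: b) : q <+: pvWalk a b := by
  induction q generalizing a b with
  | nil => simp
  | cons x q' ih =>
    obtain ⟨ta, rfl⟩ := ha
    obtain ⟨tb, hb'⟩ := hb
    cases b with
    | nil => simp at hb'
    | cons y bs =>
      rw [List.cons_append, List.cons.injEq] at hb'
      obtain ⟨rfl, hb2⟩ := hb'
      simp only [pvWalk, List.cons_append]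
      exact (List.prefix_cons_inj x).mpr (ih ⟨ta, rfl⟩ ⟨tb, hb2⟩)

theorem pvWalk_of_prefix {a b : List Char} (h : a <+: b) : pvWalk a b = a := by
  induction a generalizing b with
  | nil => simp [pvWalk]
  | cons x as_ ih =>
    obtain ⟨t, rfl⟩ := h
    simp [pvWalk, ih ⟨t, rfl⟩]

theorem pvWalk_dropLast {a b : List Char} (h : ¬ a <+: b) : pvWalk a b = pvWalk a.dropLast b := by
  induction a generalizing b with
  | nil => simp at h
  | cons x as_ ih =>
    cases b with
    | nil => simp [pvWalk]
    | cons y bs =>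
      by_cases hxy : x = y
      · subst hxy
        have has : as_ ≠ [] := by
          rintro rfl
          exact h ⟨bs, rfl⟩
        have h' : ¬ as_ <+: bs := fun hp => h ((List.prefix_cons_inj x).mpr hp)
        rw [List.dropLast_cons_of_ne_nil has]
        simp [pvWalk, ih h']
      · cases as_ with
        | nil => simp [pvWalk, hxy]
        | cons z zs => simp [pvWalk, hxy, List.dropLast_cons₂]

-- A's prefix-trimming while loop computes the greatest common prefix of the candidate and the example
theorem pvTrimP_eq (p e : List Char) : pvTrimP p e = pvWalk p e := by
  induction p using pvTrimP.induct (e := e) with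
  | case1 q h ih =>
    rw [pvTrimP, if_pos h, ih]
    have hnp : ¬ q <+: e := by
      intro hp
      rw [(PySem.Chars.startswith_iff e q).mpr hp] at h
      exact absurd h.1 (by simp)
    exact (pvWalk_dropLast hnp).symm
  | case2 q h =>
    rw [pvTrimP, if_neg h]
    rcases not_and_or.mp h with h1 | h2
    · have hs : PySem.Chars.startswith e q = true := by
        cases hb : PySem.Chars.startswith e q
        · exact absurd hb h1
        · rfl
      exact (pvWalk_of_prefix ((PySem.Chars.startswith_iff e q).mp hs)).symm
    · have hq : q = [] := not_not.mp h2
      subst hq; simp [pvWalk]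

theorem reverse_dropLast_eq (s : List Char) : s.reverse.dropLast = s.tail.reverse := by
  induction s with
  | nil => rfl
  | cons a t ih => simp

-- A's suffix-trimming while loop is the prefix-trimming loop on the reversed strings
theorem pvTrimS_eq (s e : List Char) : pvTrimS s e = (pvTrimP s.reverse e.reverse).reverse := by
  induction s using pvTrimS.induct (e := e) with
  | case1 q h ih =>
    rw [pvTrimS, if_pos h, ih]
    have hguard : PySem.Chars.startswith e.reverse q.reverse = false ∧ q.reverse ≠ [] := by
      constructor
      · cases hb : PySem.Chars.startswith e.reverse q.reverse
        · rfl
        · exfalso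
          have hq : q <:+ e := List.reverse_prefix.mp ((PySem.Chars.startswith_iff _ _).mp hb)
          rw [(PySem.Chars.endswith_iff e q).mpr hq] at h
          exact absurd h.1 (by simp)
      · simpa using h.2
    conv_rhs => rw [pvTrimP, if_pos hguard]
    rw [reverse_dropLast_eq, List.drop_one]
  | case2 q h =>
    rw [pvTrimS, if_neg h]
    rw [pvTrimP, if_neg ?_, List.reverse_reverse]
    rcases not_and_or.mp h with h1 | h2
    · intro ⟨hs, _⟩
      have he : PySem.Chars.endswith e q = true := by
        cases hb : PySem.Chars.endswith e q
        · exact absurd hb h1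
        · rfl
      have : q.reverse <+: e.reverse := List.reverse_prefix.mpr ((PySem.Chars.endswith_iff e q).mp he)
      rw [(PySem.Chars.startswith_iff _ _).mpr this] at hs
      exact absurd hs (by simp)
    · intro ⟨_, hne⟩
      exact hne (by simpa using not_not.mp h2)

-- if mn ≤ c ≤ mx lexicographically then the common prefix of mn and mx is a prefix of c
theorem pvWalk_prefix_of_between {mn mx c : List Char} (h1 : ¬ c < mn) (h2 : ¬ mx < c) :
    pvWalk mn mx <+: c := by
  induction mn generalizing mx c with
  | nil => simp [pvWalk]
  | cons a mn' ih =>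
    cases mx with
    | nil => simp [pvWalk]
    | cons b mx' =>
      by_cases hab : a = b
      · subst hab
        cases c with
        | nil =>
          exfalso; exact h1 (List.Lex.nil)
        | cons d c' =>
          rw [List.cons_lt_cons_iff] at h1 h2
          push Not at h1 h2
          have hda : d = a := le_antisymm (h2.1) (h1.1)
          subst hda
          simp only [pvWalk, if_true]
          exact (List.prefix_cons_inj d).mpr (ih (not_lt.mpr (h1.2 rfl)) (not_lt.mpr (h2.2 rfl)))
      · simp [pvWalk, hab]

theorem foldl_pvWalk_prefix_acc (xs : List String) (acc : List Char) :
    xs.foldl (fun p e => pvWalk p e.toList) acc <+: acc := by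
  induction xs generalizing acc with
  | nil => simp
  | cons c cs ih =>
    simp only [List.foldl_cons]
    exact (ih _).trans (pvWalk_prefix_left _ _)

theorem foldl_pvWalk_prefix_mem (xs : List String) (acc : List Char) {c : String} (hc : c ∈ xs) :
    xs.foldl (fun p e => pvWalk p e.toList) acc <+: c.toList := by
  induction xs generalizing acc with
  | nil => simp at hc
  | cons d ds ih =>
    simp only [List.foldl_cons]
    rcases List.mem_cons.mp hc with rfl | hm
    · exact (foldl_pvWalk_prefix_acc _ _).trans (pvWalk_prefix_right _ _)
    · exact ih _ hm

theorem prefix_foldl_pvWalk {q : List Char} (xs : List String) (acc : List Char)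
    (hacc : q <+: acc) (hxs : ∀ c ∈ xs, q <+: c.toList) :
    q <+: xs.foldl (fun p e => pvWalk p e.toList) acc := by
  induction xs generalizing acc with
  | nil => simpa using hacc
  | cons d ds ih =>
    simp only [List.foldl_cons]
    exact ih _ (prefix_pvWalk hacc (hxs d (by simp))) (fun c hc => hxs c (by simp [hc]))

-- MAIN: on a nonempty list, the left fold of pvWalk equals the common prefix of the lexicographic min and max
theorem foldl_pvWalk_eq_minmax (x : String) (rest : List String) :
    rest.foldl (fun p e => pvWalk p e.toList) x.toList =
      pvWalk ((PySem.List.min? (x :: rest) (fun s => s)).getD "").toList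
             ((PySem.List.max? (x :: rest) (fun s => s)).getD "").toList := by
  obtain ⟨mn, hmn⟩ : ∃ m, PySem.List.min? (x :: rest) (fun s => s) = some m := by
    cases h : PySem.List.min? (x :: rest) (fun s => s) with
    | none => exact absurd h (by simp [PySem.List.min?_eq_none_iff])
    | some m => exact ⟨m, rfl⟩
  obtain ⟨mx, hmx⟩ : ∃ m, PySem.List.max? (x :: rest) (fun s => s) = some m := by
    cases h : PySem.List.max? (x :: rest) (fun s => s) with
    | none => exact absurd h (by simp [PySem.List.max?_eq_none_iff])
    | some m => exact ⟨m, rfl⟩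
  rw [hmn, hmx]
  simp only [Option.getD_some]
  -- both sides are the greatest common prefix of all the strings
  have h1 : rest.foldl (fun p e => pvWalk p e.toList) x.toList <+: mn.toList := by
    rcases List.mem_cons.mp (PySem.List.min?_mem hmn) with rfl | hm
    · exact foldl_pvWalk_prefix_acc _ _
    · exact foldl_pvWalk_prefix_mem _ _ hm
  have h2 : rest.foldl (fun p e => pvWalk p e.toList) x.toList <+: mx.toList := by
    rcases List.mem_cons.mp (PySem.List.max?_mem hmx) with rfl | hm
    · exact foldl_pvWalk_prefix_acc _ _
    · exact foldl_pvWalk_prefix_mem _ _ hm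
  have hcom : ∀ c ∈ x :: rest, pvWalk mn.toList mx.toList <+: c.toList := by
    intro c hc
    have hlo : mn ≤ c := PySem.List.min?_isMin hmn c hc
    have hhi : c ≤ mx := PySem.List.max?_isMax hmx c hc
    apply pvWalk_prefix_of_between
    · exact fun hlt => absurd (String.lt_iff_toList_lt.mpr hlt) (not_lt.mpr hlo)
    · exact fun hlt => absurd (String.lt_iff_toList_lt.mpr hlt) (not_lt.mpr hhi)
  exact (prefix_pvWalk h1 h2).eq_of_length_le
    (prefix_foldl_pvWalk _ _ (hcom x (by simp)) (fun c hc => hcom c (by simp [hc]))).length_le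

-- A's suffix fold is the pvWalk fold on the reversed strings, reversed back
theorem foldl_pvTrimS_rev (xs : List String) (acc : List Char) :
    xs.foldl (fun s e => pvTrimS s e.toList) acc
      = (xs.foldl (fun p e => pvWalk p e.toList.reverse) acc.reverse).reverse := by
  induction xs generalizing acc with
  | nil => simp
  | cons d ds ih =>
    simp only [List.foldl_cons]
    rw [ih, pvTrimS_eq, pvTrimP_eq, List.reverse_reverse]

-- … and that fold is the min/max fold over B's list of reversed strings
theorem foldl_rev_eq_minmax (x : String) (rest : List String) :
    rest.foldl (fun p e => pvWalk p e.toList.reverse) x.toList.reverse =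
      pvWalk ((PySem.List.min? ((x :: rest).map (fun s => String.ofList s.toList.reverse)) (fun s => s)).getD "").toList
             ((PySem.List.max? ((x :: rest).map (fun s => String.ofList s.toList.reverse)) (fun s => s)).getD "").toList := by
  have h := foldl_pvWalk_eq_minmax (String.ofList x.toList.reverse)
      (rest.map (fun s => String.ofList s.toList.reverse))
  rw [List.foldl_map] at h
  simp only [String.toList_ofList] at h
  simpa [List.map_cons] using h

-- ===== VERDICT (by name: the statement is the Claim_ definition above) =====
theorem generar_regex_heuristica_spec : Claim_equal_generar_regex_heuristica := by
  intro l _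
  unfold Spec_generar_regex_heuristica
  cases l with
  | nil => rfl
  | cons x rest =>
    simp only [generar_regex_heuristica, generar_regex_heuristica_alt]
    have hp : rest.foldl (fun p e => pvTrimP p e.toList) x.toList
        = pvWalk ((PySem.List.min? (x :: rest) (fun s => s)).getD "").toList
                 ((PySem.List.max? (x :: rest) (fun s => s)).getD "").toList := by
      simp only [pvTrimP_eq]
      exact foldl_pvWalk_eq_minmax x rest
    have hs : rest.foldl (fun s e => pvTrimS s e.toList) x.toList
        = (pvWalk ((PySem.List.min? ((x :: rest).map (fun s => String.ofList s.toList.reverse)) (fun s => s)).getD "").toList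
                  ((PySem.List.max? ((x :: rest).map (fun s => String.ofList s.toList.reverse)) (fun s => s)).getD "").toList).reverse := by
      rw [foldl_pvTrimS_rev, foldl_rev_eq_minmax]
    rw [hp, hs]
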